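-- pv_equiv track=rewrite | github.com/tac-tics/ploverize | consonants.py | consonant_clusters_in_pronunciation
-- ===== SOURCE A (Python) =====
-- VOWELS = [
--     'AA',
--     'AE',
--     'AH',
--     'AO',
--     'AW',
--     'AY',
--     'EH',
--     'ER',
--     'EY',
--     'IH',
--     'IY',
--     'OW',
--     'OY',
--     'UH',
--     'UW',
-- ]
--
-- def consonant_clusters_in_pronunciation(pronunciation):
--     clusters = [[]]
--     for sound in pronunciation:
--         if any(sound.startswith(vowel) for vowel in VOWELS):
--             clusters.append([])
--         else:
--             cluster = clusters[-1]
--             cluster.append(sound)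
--     return [c for c in clusters if c]
-- ===== SOURCE B (Python) =====
-- VOWELS = [
--     'AA', 'AE', 'AH', 'AO', 'AW', 'AY', 'EH', 'ER',
--     'EY', 'IH', 'IY', 'OW', 'OY', 'UH', 'UW',
-- ]
--
-- def _is_vowel(sound):
--     return any(sound.startswith(v) for v in VOWELS)
--
-- def consonant_clusters_in_pronunciation(pronunciation):
--     out = []
--     i = 0
--     n = len(pronunciation)
--     while i < n:
--         if _is_vowel(pronunciation[i]):
--             i += 1
--             continue
--         j = i
--         while j < n and not _is_vowel(pronunciation[j]):
--             j += 1
--         out.append(pronunciation[i:j])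
--         i = j
--     return out
-- ===== Notes on version B (the rewrite author's own statement) =====
-- stated objective: alternative
-- what changed: B scans the list and emits each maximal consonant run directly (span/two-index grouping), instead of A's sentinel-empty-cluster accumulator followed by a final filter of empty clusters.
import Mathlib
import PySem

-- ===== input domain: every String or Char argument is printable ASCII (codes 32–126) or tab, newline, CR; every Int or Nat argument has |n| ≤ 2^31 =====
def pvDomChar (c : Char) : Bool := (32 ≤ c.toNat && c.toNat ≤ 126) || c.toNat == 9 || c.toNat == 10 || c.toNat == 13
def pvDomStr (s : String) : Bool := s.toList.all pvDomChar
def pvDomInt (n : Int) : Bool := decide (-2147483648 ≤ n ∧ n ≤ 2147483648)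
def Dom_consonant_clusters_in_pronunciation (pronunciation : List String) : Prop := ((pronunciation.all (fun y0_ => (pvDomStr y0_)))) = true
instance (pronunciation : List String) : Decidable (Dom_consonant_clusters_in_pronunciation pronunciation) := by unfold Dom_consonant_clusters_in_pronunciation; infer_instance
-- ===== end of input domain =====

-- B replaces A's sentinel-empty-cluster accumulator + final filter with a direct
-- span-based grouping that emits each maximal consonant run (alternative decomposition).

-- ===== PORT A =====
def pvVOWELS : List String :=
  ["AA", "AE", "AH", "AO", "AW", "AY", "EH", "ER", "EY", "IH", "IY", "OW", "OY", "UH", "UW"]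

-- any(sound.startswith(vowel) for vowel in VOWELS)
def pvIsVowel (sound : String) : Bool :=
  pvVOWELS.any (fun vowel => PySem.Str.startswith sound vowel)

-- one iteration of A's for-loop; clusters[-1].append(sound) = replace the last cluster
def pvStepA (clusters : List (List String)) (sound : String) : List (List String) :=
  if pvIsVowel sound then clusters ++ [[]]
  else clusters.dropLast ++ [clusters.getLast! ++ [sound]]

def consonant_clusters_in_pronunciation (pronunciation : List String) : List (List String) :=
  (pronunciation.foldl pvStepA [[]]).filter (fun c => !c.isEmpty)

-- ===== PORT B =====
def consonant_clusters_in_pronunciation_alt (pronunciation : List String) : List (List String) :=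
  match pronunciation with
  | [] => []
  | x :: xs =>
    if pvIsVowel x then consonant_clusters_in_pronunciation_alt xs
    else (x :: xs.takeWhile (fun s => !pvIsVowel s)) ::
         consonant_clusters_in_pronunciation_alt (xs.dropWhile (fun s => !pvIsVowel s))
termination_by pronunciation.length
decreasing_by
  all_goals have := List.length_dropWhile_le (p := fun s => !pvIsVowel s) (l := xs)
  all_goals simp
  all_goals omega

-- ===== PRECONDITION & SPEC =====
def Spec_consonant_clusters_in_pronunciation (pronunciation : List String) (out : List (List String)) : Prop := out = consonant_clusters_in_pronunciation_alt pronunciation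
instance (pronunciation : List String) (out : List (List String)) : Decidable (Spec_consonant_clusters_in_pronunciation pronunciation out) := by unfold Spec_consonant_clusters_in_pronunciation; infer_instance

-- ===== CLAIM (what is proved, stated in full; the proofs are below) =====
def Claim_equal_consonant_clusters_in_pronunciation : Prop := ∀ (pronunciation : List String), Dom_consonant_clusters_in_pronunciation pronunciation → Spec_consonant_clusters_in_pronunciation pronunciation (consonant_clusters_in_pronunciation pronunciation)

-- ===== LEMMAS AND PROOFS =====

theorem pvGetLastBang {α : Type} [Inhabited α] (l : List α) (h : l ≠ []) : l.getLast! = l.getLast h := by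
  cases l with
  | nil => simp at h
  | cons a as => simp [List.getLast!]

-- the part of A's result contributed by the current (last) cluster `cur` and the rest of the input
def pvAux (cur : List String) : List String → List (List String)
  | [] => if cur.isEmpty then [] else [cur]
  | x :: xs =>
    if pvIsVowel x then (if cur.isEmpty then [] else [cur]) ++ pvAux [] xs
    else pvAux (cur ++ [x]) xs

theorem pvAux_eq_alt (l : List String) : ∀ (cur : List String),
    pvAux cur l = if cur.isEmpty then consonant_clusters_in_pronunciation_alt l
      else (cur ++ l.takeWhile (fun s => !pvIsVowel s)) ::
           consonant_clusters_in_pronunciation_alt (l.dropWhile (fun s => !pvIsVowel s)) := by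
  induction l with
  | nil =>
    intro cur
    cases cur <;> simp [pvAux, consonant_clusters_in_pronunciation_alt]
  | cons x xs ih =>
    intro cur
    by_cases hv : pvIsVowel x
    · rw [pvAux, if_pos hv, ih]
      cases cur with
      | nil => simp [consonant_clusters_in_pronunciation_alt, hv]
      | cons c cs => simp [consonant_clusters_in_pronunciation_alt, hv]
    · rw [pvAux, if_neg hv, ih, if_neg (by simp)]
      cases cur with
      | nil => simp [consonant_clusters_in_pronunciation_alt, hv]
      | cons c cs => simp [hv]

theorem pvFoldA_eq (l : List String) : ∀ (done : List (List String)) (cur : List String),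
    (l.foldl pvStepA (done ++ [cur])).filter (fun c => !c.isEmpty)
      = done.filter (fun c => !c.isEmpty) ++ pvAux cur l := by
  induction l with
  | nil =>
    intro done cur
    cases cur <;> simp [pvAux, List.filter_append]
  | cons x xs ih =>
    intro done cur
    rw [List.foldl_cons]
    by_cases hv : pvIsVowel x
    · have h1 : pvStepA (done ++ [cur]) x = (done ++ [cur]) ++ [[]] := by
        simp [pvStepA, hv]
      rw [h1, ih (done ++ [cur]) []]
      cases cur <;> simp [pvAux, hv, List.filter_append]
    · have h1 : pvStepA (done ++ [cur]) x = done ++ [cur ++ [x]] := by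
        simp only [pvStepA, if_neg hv, pvGetLastBang _ (by simp : done ++ [cur] ≠ []),
          List.getLast_concat, List.dropLast_concat]
      rw [h1, ih done (cur ++ [x])]
      simp [pvAux, hv]

-- ===== VERDICT (by name: the statement is the Claim_ definition above) =====
theorem consonant_clusters_in_pronunciation_spec : Claim_equal_consonant_clusters_in_pronunciation := by
  intro p _
  show _ = _
  have h := pvFoldA_eq p [] []
  simp only [List.nil_append, List.filter_nil] at h
  rw [consonant_clusters_in_pronunciation, h, pvAux_eq_alt]
  simp
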